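-- pv_equiv track=rewrite | github.com/thiagoggogleari/Exercicios_Python | Exercícios com Strings/Exercício 12.py | montarNumero
-- ===== SOURCE A (Python) =====
-- def montarNumero(num):
--   numNovo = ""
--   for i in range(len(num)):
--     if(i == 0):
--       numNovo += "3"
--     if(i == 3):
--       numNovo += "-"
--     numNovo += num[i]
--   return numNovo
-- ===== SOURCE B (Python) =====
-- def montarNumero(num):
--   if not num:
--     return ""
--   if len(num) > 3:
--     return "3" + num[:3] + "-" + num[3:]
--   return "3" + num
-- ===== Notes on version B (the rewrite author's own statement) =====
-- stated objective: simpler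
-- what changed: Replaced the per-character loop with index tests by a direct composition of the prefix, a slice of the first three characters, the dash, and the rest, avoiding repeated string concatenation.
import Mathlib
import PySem

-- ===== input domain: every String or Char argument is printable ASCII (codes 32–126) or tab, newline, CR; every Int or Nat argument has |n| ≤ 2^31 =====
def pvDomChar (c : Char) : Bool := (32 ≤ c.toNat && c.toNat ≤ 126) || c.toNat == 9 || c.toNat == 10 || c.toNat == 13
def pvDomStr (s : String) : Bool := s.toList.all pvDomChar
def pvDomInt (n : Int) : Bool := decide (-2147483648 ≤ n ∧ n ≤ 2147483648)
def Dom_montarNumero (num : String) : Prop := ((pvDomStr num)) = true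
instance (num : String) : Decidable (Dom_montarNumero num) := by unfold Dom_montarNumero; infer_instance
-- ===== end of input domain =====

-- B replaces A's per-character loop (with index tests) by a direct composition of prefix, first-three slice, dash and remainder (simpler).

-- ===== PORT A =====
-- for i in range(len(num)): if i==0: numNovo+='3'; if i==3: numNovo+='-'; numNovo+=num[i]
-- (num[i] is always in range here, so it is ported as pyGetD with an unused default)
def montarNumero (num : String) : String :=
  let cs := num.toList
  String.ofList ((PySem.List.pyRange 0 (cs.length : Int) 1).foldl
    (fun (acc : List Char) (i : Int) =>
      let acc1 := if i = 0 then acc ++ ['3'] else acc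
      let acc2 := if i = 3 then acc1 ++ ['-'] else acc1
      acc2 ++ [PySem.List.pyGetD cs i ' ']) [])

-- ===== PORT B =====
-- if not num: return ""; if len(num) > 3: return "3"+num[:3]+"-"+num[3:]; return "3"+num
def montarNumero_alt (num : String) : String :=
  let cs := num.toList
  if cs = [] then ""
  else if 3 < (cs.length : Int) then
    String.ofList (['3'] ++ PySem.List.slice cs none (some 3) ++ ['-'] ++ PySem.List.slice cs (some 3) none)
  else String.ofList (['3'] ++ cs)

-- ===== PRECONDITION & SPEC =====
def Spec_montarNumero (num : String) (out : String) : Prop := out = montarNumero_alt num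
instance (num : String) (out : String) : Decidable (Spec_montarNumero num out) := by unfold Spec_montarNumero; infer_instance

-- ===== CLAIM (what is proved, stated in full; the proofs are below) =====
def Claim_equal_montarNumero : Prop := ∀ (num : String), Dom_montarNumero num → Spec_montarNumero num (montarNumero num)

-- ===== LEMMAS AND PROOFS =====

-- The loop of A, on the character list, produces exactly B's composed list.
theorem montarNumero_lists (cs : List Char) :
    ((PySem.List.pyRange 0 (cs.length : Int) 1).foldl
      (fun (acc : List Char) (i : Int) =>
        let acc1 := if i = 0 then acc ++ ['3'] else acc
        let acc2 := if i = 3 then acc1 ++ ['-'] else acc1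
        acc2 ++ [PySem.List.pyGetD cs i ' ']) [])
    = (if cs = [] then []
       else if 3 < (cs.length : Int) then
         ['3'] ++ PySem.List.slice cs none (some 3) ++ ['-'] ++ PySem.List.slice cs (some 3) none
       else ['3'] ++ cs) := by
  rcases cs with _ | ⟨a, _ | ⟨b, _ | ⟨c, _ | ⟨d, t⟩⟩⟩⟩
  · simp [PySem.List.pyRange_one_eq_nil]
  · have h : PySem.List.pyRange 0 (([a] : List Char).length : Int) 1 = [0] := by
      norm_num; decide
    rw [h]; simp only [List.foldl]
    norm_num [PySem.List.pyGetD_ofNat']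
  · have h : PySem.List.pyRange 0 (([a, b] : List Char).length : Int) 1 = [0, 1] := by
      norm_num; decide
    rw [h]; simp only [List.foldl]
    norm_num [PySem.List.pyGetD_ofNat']
    simp
  · have h : PySem.List.pyRange 0 (([a, b, c] : List Char).length : Int) 1 = [0, 1, 2] := by
      norm_num; decide
    rw [h]; simp only [List.foldl]
    norm_num [PySem.List.pyGetD_ofNat']
    simp
  · have hsplit : PySem.List.pyRange 0 ((a::b::c::d::t : List Char).length : Int) 1
        = PySem.List.pyRange 0 4 1 ++ PySem.List.pyRange 4 ((a::b::c::d::t : List Char).length : Int) 1 := by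
      apply PySem.List.pyRange_one_append 0 4 _ (by omega)
      simp only [List.length_cons]; push_cast; omega
    rw [hsplit, List.foldl_append]
    have h04 : PySem.List.pyRange 0 4 1 = [0, 1, 2, 3] := by decide
    rw [h04]
    simp only [List.foldl]
    norm_num [PySem.List.pyGetD_ofNat']
    have hcn := PySem.List.foldl_congr_mem
      (l := PySem.List.pyRange 4 ((a::b::c::d::t : List Char).length : Int) 1)
      (init := ['3', a, b, c, '-', d])
      (f := fun (acc : List Char) (i : Int) =>
        (if i = 3 then (if i = 0 then acc ++ ['3'] else acc) ++ ['-'] else if i = 0 then acc ++ ['3'] else acc)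
          ++ [PySem.List.pyGetD (a::b::c::d::t) i ' '])
      (g := fun (acc : List Char) (i : Int) =>
        acc ++ [PySem.List.pyGetD (a::b::c::d::t) i ' '])
      (fun acc x hx => by
        have hx4 : 4 ≤ x := (PySem.List.mem_pyRange_one.mp hx).1
        simp only
        rw [if_neg (by omega), if_neg (by omega)])
    have hlen : ((t.length : Int) + 1 + 1 + 1 + 1) = ((a::b::c::d::t : List Char).length : Int) := by
      simp only [List.length_cons]; push_cast; omega
    rw [hlen, hcn]
    have h2 := PySem.List.foldl_pyRange_pyGetD' (xs := (a::b::c::d::t : List Char)) (d := ' ')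
      (f := fun (acc : List Char) (c : Char) => acc ++ [c]) (init := ['3', a, b, c, '-', d]) (a := 4) (by omega)
    rw [h2]
    rw [PySem.List.foldl_append_singleton_eq_self]
    simp [PySem.List.slice]
    omega

-- ===== VERDICT (by name: the statement is the Claim_ definition above) =====
theorem montarNumero_spec : Claim_equal_montarNumero := by
  intro num _
  unfold Spec_montarNumero montarNumero montarNumero_alt
  simp only
  rw [montarNumero_lists]
  split_ifs <;> rfl
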